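-- pv_equiv track=rewrite | github.com/sophiallen/wordsearch | wordSearchFinal.py | dgSearchRt
-- ===== SOURCE A (Python) =====
-- def dgSearchRt(matrix, row, ndx):
--     '''given starting coordinates within a matrix, searches for possible words
--     diagonally to the right and down, returns list of possible words.'''
--     #start by figuring out how many rows and columns are in the matrix as a whole.
--     num_rows = len(matrix)
--     num_columns = len(matrix[0])
--     #initialize list accumulator, counter to track word size, and base word.
--     found = []
--     wordlen = 1
--     word = matrix[row][ndx]
--
--     #while there are columns to the right, and rows beneath:
--     while wordlen + ndx < num_columns and wordlen + row < num_rows: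
--
--         #set new row and column coordinates by shifting down and right by distance of wordlen.
--         newrow = row + wordlen
--         newndx = ndx + wordlen
--
--         #add the letter at the new coordinates to the base word.
--         word += matrix[newrow][newndx]
--
--         #increase the shift distance by one.
--         wordlen += 1
--
--         #add word to the list of possibilities.
--         found.append(word)
--
--     return found
-- ===== SOURCE B (Python) =====
-- def dgSearchRt(matrix, row, ndx):
--     '''given starting coordinates within a matrix, searches for possible words
--     diagonally to the right and down, returns list of possible words.'''
--     num_rows = len(matrix)
--     num_columns = len(matrix[0])
--     first = matrix[row][ndx]
--     # closed-form diagonal length: words of length 2..k exist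
--     k = min(num_columns - ndx, num_rows - row)
--     # word j is `first` followed by diagonal cells 1..j, for j = 1..k-1
--     return [first + ''.join(matrix[row + i][ndx + i] for i in range(1, j + 1))
--             for j in range(1, k)]
-- ===== Notes on version B (the rewrite author's own statement) =====
-- stated objective: alternative
-- what changed: B replaces A's stateful while loop (growing word + appended accumulator) by a closed-form diagonal length k = min(num_columns-ndx, num_rows-row) and a nested comprehension that rebuilds each prefix word directly from the cells, with no loop-carried state.
import Mathlib
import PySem

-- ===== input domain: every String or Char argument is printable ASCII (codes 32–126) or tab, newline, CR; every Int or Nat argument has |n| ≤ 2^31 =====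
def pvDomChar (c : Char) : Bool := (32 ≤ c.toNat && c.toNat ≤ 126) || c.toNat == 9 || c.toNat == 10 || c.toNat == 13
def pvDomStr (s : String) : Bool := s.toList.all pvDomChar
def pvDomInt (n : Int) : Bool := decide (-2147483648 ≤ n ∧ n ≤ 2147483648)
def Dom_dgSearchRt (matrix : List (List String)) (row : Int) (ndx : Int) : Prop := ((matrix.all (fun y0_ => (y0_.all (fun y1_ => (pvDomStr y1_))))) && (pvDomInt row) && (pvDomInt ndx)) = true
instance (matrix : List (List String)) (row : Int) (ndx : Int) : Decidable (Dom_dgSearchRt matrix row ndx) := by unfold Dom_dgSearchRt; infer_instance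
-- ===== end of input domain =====

-- B replaces A's stateful while loop by a closed-form diagonal length k and a nested
-- comprehension rebuilding each prefix word directly from the cells (alternative decomposition; equal return value).
-- Pre_ excludes exactly the inputs on which the Python A raises IndexError (empty matrix,
-- start cell out of Python range, or a ragged row too short at a visited diagonal cell).

-- ===== PORT A =====
-- A's growing word is carried as a List Char (the list side of the Python str; appended cells via ++, materialised with String.ofList when stored).
def dgAloop (matrix : List (List String)) (numRows numCols row ndx : Int) : Nat → Int → List Char → List String → List String
  | 0, _, _, found => found
  | Nat.succ n, wordlen, word, found =>
    if wordlen + ndx < numCols ∧ wordlen + row < numRows then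
      match (PySem.List.pyGet? matrix (row + wordlen)).bind (fun r => PySem.List.pyGet? r (ndx + wordlen)) with
      | none => found  -- IndexError in Python (excluded by Pre_)
      | some c =>
        dgAloop matrix numRows numCols row ndx n (wordlen + 1) (word ++ c.toList) (found ++ [String.ofList (word ++ c.toList)])
    else found

def dgSearchRt (matrix : List (List String)) (row : Int) (ndx : Int) : List String :=
  let numRows : Int := (matrix.length : Int)
  match PySem.List.pyGet? matrix 0 with
  | none => []  -- IndexError on matrix[0] (excluded by Pre_)
  | some row0 =>
    let numCols : Int := (row0.length : Int)
    match (PySem.List.pyGet? matrix row).bind (fun r => PySem.List.pyGet? r ndx) with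
    | none => []  -- IndexError on matrix[row][ndx] (excluded by Pre_)
    | some w =>
      -- fuel: the while condition forces wordlen < min(numCols-ndx, numRows-row), so this many steps always suffice
      dgAloop matrix numRows numCols row ndx ((min (numCols - ndx) (numRows - row)).toNat) 1 w.toList []

-- ===== PORT B =====
-- the diagonal cell matrix[row+i][ndx+i] (Python raises IndexError where this is none; excluded by Pre_)
def dgCell (matrix : List (List String)) (row ndx i : Int) : String :=
  match (PySem.List.pyGet? matrix (row + i)).bind (fun r => PySem.List.pyGet? r (ndx + i)) with
  | none => ""  -- IndexError in Python (excluded by Pre_)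
  | some s => s

def dgSearchRt_alt (matrix : List (List String)) (row : Int) (ndx : Int) : List String :=
  let numRows : Int := (matrix.length : Int)
  match PySem.List.pyGet? matrix 0 with
  | none => []  -- IndexError on matrix[0] (excluded by Pre_)
  | some row0 =>
    match (PySem.List.pyGet? matrix row).bind (fun r => PySem.List.pyGet? r ndx) with
    | none => []  -- IndexError on matrix[row][ndx] (excluded by Pre_)
    | some first =>
      let k : Int := min ((row0.length : Int) - ndx) (numRows - row)
      -- 'first + join' ported on the list-of-chars side (Lean's String.append is opaque to the kernel)
      (PySem.List.pyRange 1 k 1).map (fun j =>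
        String.ofList (first.toList ++
          (PySem.Str.join "" ((PySem.List.pyRange 1 (j + 1) 1).map (dgCell matrix row ndx))).toList))

-- ===== PRECONDITION & SPEC =====
-- Pre_ = exactly the inputs on which A returns normally: matrix[0], matrix[row][ndx] and every visited diagonal cell exist (Python indexing, negative wraparound included).
def Pre_dgSearchRt (matrix : List (List String)) (row : Int) (ndx : Int) : Prop :=
  matrix ≠ [] ∧
  ((PySem.List.pyGet? matrix row).bind (fun r => PySem.List.pyGet? r ndx)).isSome = true ∧
  ∀ i ∈ List.range ((min ((matrix.headI.length : Int) - ndx) ((matrix.length : Int) - row)).toNat),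
    1 ≤ i →
    ((PySem.List.pyGet? matrix (row + i)).bind (fun r => PySem.List.pyGet? r (ndx + i))).isSome = true
instance (matrix : List (List String)) (row : Int) (ndx : Int) : Decidable (Pre_dgSearchRt matrix row ndx) := by unfold Pre_dgSearchRt; infer_instance
def pvWitness_dgSearchRt : List (List String) × Int × Int := ([["a", "b", "c"], ["d", "e", "f"], ["g", "h", "i"]], 0, 0)

def Spec_dgSearchRt (matrix : List (List String)) (row : Int) (ndx : Int) (out : List String) : Prop := out = dgSearchRt_alt matrix row ndx
instance (matrix : List (List String)) (row : Int) (ndx : Int) (out : List String) : Decidable (Spec_dgSearchRt matrix row ndx out) := by unfold Spec_dgSearchRt; infer_instance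

-- ===== CLAIM (what is proved, stated in full; the proofs are below) =====
def Claim_equal_dgSearchRt : Prop := ∀ (matrix : List (List String)) (row : Int) (ndx : Int), Dom_dgSearchRt matrix row ndx → Pre_dgSearchRt matrix row ndx → Spec_dgSearchRt matrix row ndx (dgSearchRt matrix row ndx)

-- ===== LEMMAS AND PROOFS =====

theorem chars_join_nil_flatten (ls : List (List Char)) : PySem.Chars.join [] ls = ls.flatten := by
  induction ls with
  | nil => simp [PySem.Chars.join_nil]
  | cons a t ih =>
    cases t with
    | nil => simp [PySem.Chars.join_singleton]
    | cons b t2 => rw [PySem.Chars.join_cons_cons]; simp_all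

theorem str_join_empty (parts : List String) :
    PySem.Str.join "" parts = String.ofList ((parts.map String.toList).flatten) := by
  simp [PySem.Str.join, chars_join_nil_flatten]

theorem headI_of_pyGet?_zero (matrix : List (List String)) (row0 : List String)
    (h : PySem.List.pyGet? matrix 0 = some row0) : matrix.headI = row0 := by
  cases matrix with
  | nil => simp [PySem.List.pyGet?, PySem.List.pyIdx?] at h
  | cons a t =>
    simp [PySem.List.pyGet?, PySem.List.pyIdx?] at h
    simp [h]

-- A's loop computes exactly the j-th prefix words of B, for j = wordlen .. k-1.
theorem dgAloop_eq (matrix : List (List String)) (numRows numCols row ndx k : Int)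
    (first : String)
    (hk : k = min (numCols - ndx) (numRows - row)) :
    ∀ (n : Nat) (m : Int) (found : List String),
    1 ≤ m →
    (k - m).toNat ≤ n →
    (∀ j : Int, m ≤ j → j < k →
      (PySem.List.pyGet? matrix (row + j)).bind (fun r => PySem.List.pyGet? r (ndx + j))
        = some (dgCell matrix row ndx j)) →
    dgAloop matrix numRows numCols row ndx n m
        (first.toList ++ (((PySem.List.pyRange 1 m 1).map (dgCell matrix row ndx)).map String.toList).flatten) found
      = found ++ (PySem.List.pyRange m k 1).map (fun j =>
          String.ofList (first.toList ++
            (((PySem.List.pyRange 1 (j + 1) 1).map (dgCell matrix row ndx)).map String.toList).flatten)) := by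
  intro n
  induction n with
  | zero =>
    intro m found hm hfuel _
    have hkm : k ≤ m := by omega
    simp [dgAloop, PySem.List.pyRange_one_eq_nil hkm]
  | succ n ih =>
    intro m found hm hfuel hcells
    simp only [dgAloop]
    by_cases h : m < k
    · rw [if_pos (by omega : m + ndx < numCols ∧ m + row < numRows)]
      rw [hcells m le_rfl h]
      dsimp only
      have hstep : PySem.List.pyRange 1 (m + 1) 1 = PySem.List.pyRange 1 m 1 ++ [m] :=
        PySem.List.pyRange_one_succ_right (by omega)
      have hword :
          (first.toList ++ (((PySem.List.pyRange 1 m 1).map (dgCell matrix row ndx)).map String.toList).flatten)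
            ++ (dgCell matrix row ndx m).toList
          = first.toList ++ (((PySem.List.pyRange 1 (m + 1) 1).map (dgCell matrix row ndx)).map String.toList).flatten := by
        rw [hstep]; simp
      rw [hword, ih (m + 1) _ (by omega) (by omega)
        (fun j hj1 hj2 => hcells j (by omega) hj2)]
      rw [PySem.List.pyRange_one_cons h, List.map_cons]
      simp
    · rw [if_neg (by omega : ¬ (m + ndx < numCols ∧ m + row < numRows))]
      simp [PySem.List.pyRange_one_eq_nil (by omega : k ≤ m)]

-- ===== VERDICT (by name: the statement is the Claim_ definition above) =====
theorem dgSearchRt_spec : Claim_equal_dgSearchRt := by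
  intro matrix row ndx _hdom hpre
  obtain ⟨hne, hw0, hcells0⟩ := hpre
  unfold Spec_dgSearchRt dgSearchRt dgSearchRt_alt
  cases h0 : PySem.List.pyGet? matrix 0 with
  | none => rfl
  | some row0 =>
    cases hw : (PySem.List.pyGet? matrix row).bind (fun r => PySem.List.pyGet? r ndx) with
    | none => simp [hw] at hw0
    | some w =>
      dsimp only
      have hhead := headI_of_pyGet?_zero matrix row0 h0
      set k : Int := min ((row0.length : Int) - ndx) ((matrix.length : Int) - row) with hkdef
      have hcells : ∀ j : Int, (1:Int) ≤ j → j < k →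
          (PySem.List.pyGet? matrix (row + j)).bind (fun r => PySem.List.pyGet? r (ndx + j))
            = some (dgCell matrix row ndx j) := by
        intro j hj1 hj2
        have hmem : j.toNat ∈ List.range ((min ((matrix.headI.length : Int) - ndx) ((matrix.length : Int) - row)).toNat) := by
          rw [List.mem_range, hhead]; omega
        have := hcells0 j.toNat hmem (by omega)
        have hjcast : (j.toNat : Int) = j := by omega
        rw [hjcast] at this
        cases hb : (PySem.List.pyGet? matrix (row + j)).bind (fun r => PySem.List.pyGet? r (ndx + j)) with
        | none => rw [hb] at this; simp at this
        | some s => simp [dgCell, hb]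
      have hbase : w.toList
          = w.toList ++ (((PySem.List.pyRange 1 1 1).map (dgCell matrix row ndx)).map String.toList).flatten := by
        simp [PySem.List.pyRange_one_eq_nil (le_refl (1:Int))]
      rw [hbase, dgAloop_eq matrix ((matrix.length : Int)) ((row0.length : Int)) row ndx k w hkdef
        k.toNat 1 [] le_rfl (by omega) hcells]
      simp [str_join_empty]
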